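-- pv_equiv track=rewrite | github.com/BrunoSFavaro/algoritimos | C&IT/morse.py | expand_combinations
-- ===== SOURCE A (Python) =====
-- def expand_combinations(morse_code):
--     # Se não há '?', a string já é válida e retorna apenas ela mesma
--     if "?" not in morse_code:
--         return [morse_code]
--
--     # Lista para armazenar as combinações geradas
--     combinations = [morse_code]  # Começamos com a palavra original
--
--     # Itera sobre cada caractere de morse_code
--     for i in range(len(morse_code)):
--         # Verifica se encontramos um '?', indicando que precisamos gerar possibilidades
--         if morse_code[i] == "?":
--             # Cria uma nova lista de combinações substituindo '?' por '.' e '-'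
--             new_combinations = []
--             # Para cada combinação existente, substituímos '?' por '.' e '-'
--             for combo in combinations:
--                 # Substitui '?' por '.' e adiciona a nova combinação
--                 new_combinations.append(combo[:i] + "." + combo[i+1:])
--                 # Substitui '?' por '-' e adiciona a nova combinação
--                 new_combinations.append(combo[:i] + "-" + combo[i+1:])
--             # Atualiza as combinações com as novas geradas
--             combinations = new_combinations
--
--     # Retorna todas as combinações gerad'as para a string de morse_code
--     return combinations
-- ===== SOURCE B (Python) =====
-- def expand_combinations(morse_code):
--     # Build the expansions back-to-front: fold over the characters from the right,
--     # prepending the character (or both '.'/'-' for '?') to every expansion of the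
--     # suffix already built — no index arithmetic, no slicing, no list rebuilding per '?'.
--     out = ['']
--     for c in reversed(morse_code):
--         if c == '?':
--             out = ['.' + s for s in out] + ['-' + s for s in out]
--         else:
--             out = [c + s for s in out]
--     return out
-- ===== Notes on version B (the rewrite author's own statement) =====
-- stated objective: alternative
-- what changed: Replaces A's index loop (which rebuilds the whole combination list with slicing at every wildcard position) by a single right-to-left fold over the characters that prepends each character, or both substitute symbols, to every expansion of the suffix already built; it trades A's slicing for character-by-character string building.
import Mathlib
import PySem

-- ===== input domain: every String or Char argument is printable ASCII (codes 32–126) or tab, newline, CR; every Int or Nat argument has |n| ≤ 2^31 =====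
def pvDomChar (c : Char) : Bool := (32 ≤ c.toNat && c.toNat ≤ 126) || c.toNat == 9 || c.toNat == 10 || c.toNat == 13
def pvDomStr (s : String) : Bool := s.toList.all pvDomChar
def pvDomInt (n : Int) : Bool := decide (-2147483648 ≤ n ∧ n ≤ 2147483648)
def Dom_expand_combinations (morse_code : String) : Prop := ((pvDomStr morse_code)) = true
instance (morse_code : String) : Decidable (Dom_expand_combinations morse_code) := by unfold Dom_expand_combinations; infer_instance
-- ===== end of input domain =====

-- B replaces A's index loop (per-'?' slicing and rebuilding of the whole list) by a
-- single right-to-left fold that prepends to the expansions of the suffix; objective: alternative.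

-- ===== PORT A =====
-- A, transliterated on the character list (PySem string primitives are defined on List Char).
def pvExpandA (cs : List Char) : List (List Char) :=
  if PySem.Chars.isIn ['?'] cs = false then [cs]
  else
    (PySem.List.pyRange 0 (cs.length : Int) 1).foldl
      (fun combinations i =>
        if PySem.List.pyGetD cs i ' ' = '?' then
          combinations.foldl
            (fun new_combinations combo =>
              new_combinations
                ++ [PySem.List.slice combo none (some i) ++ ['.']
                      ++ PySem.List.slice combo (some (i + 1)) none]
                ++ [PySem.List.slice combo none (some i) ++ ['-']
                      ++ PySem.List.slice combo (some (i + 1)) none]) []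
        else combinations)
      [cs]

def expand_combinations (morse_code : String) : List String :=
  (pvExpandA morse_code.toList).map String.ofList

-- ===== PORT B =====
-- B, transliterated: a fold over the characters from the right.
def pvExpandB (cs : List Char) : List (List Char) :=
  cs.reverse.foldl
    (fun out c =>
      if c = '?' then out.map ('.' :: ·) ++ out.map ('-' :: ·)
      else out.map (c :: ·))
    [[]]

def expand_combinations_alt (morse_code : String) : List String :=
  (pvExpandB morse_code.toList).map String.ofList

-- ===== PRECONDITION & SPEC =====
def Spec_expand_combinations (morse_code : String) (out : List String) : Prop := out = expand_combinations_alt morse_code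
instance (morse_code : String) (out : List String) : Decidable (Spec_expand_combinations morse_code out) := by unfold Spec_expand_combinations; infer_instance

-- ===== CLAIM (what is proved, stated in full; the proofs are below) =====
def Claim_equal_expand_combinations : Prop := ∀ (morse_code : String), Dom_expand_combinations morse_code → Spec_expand_combinations morse_code (expand_combinations morse_code)

-- ===== LEMMAS AND PROOFS =====

-- B's fold peels one character off the front
theorem pvExpandB_cons (c : Char) (rest : List Char) :
    pvExpandB (c :: rest) =
      if c = '?' then (pvExpandB rest).map ('.' :: ·) ++ (pvExpandB rest).map ('-' :: ·)
      else (pvExpandB rest).map (c :: ·) := by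
  simp [pvExpandB, List.reverse_cons, List.foldl_append]

-- every expansion has the length of its source
theorem pvExpandB_length {cs : List Char} {e : List Char} (he : e ∈ pvExpandB cs) :
    e.length = cs.length := by
  induction cs generalizing e with
  | nil => simp [pvExpandB] at he; simp [he]
  | cons c rest ih =>
      rw [pvExpandB_cons] at he
      split at he <;> simp only [List.mem_append, List.mem_map] at he
      · rcases he with ⟨x, hx, rfl⟩ | ⟨x, hx, rfl⟩ <;> simp [ih hx]
      · rcases he with ⟨x, hx, rfl⟩; simp [ih hx]

-- how B's recursion acts on a snoc
theorem pvExpandB_snoc (cs : List Char) (c : Char) :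
    pvExpandB (cs ++ [c]) =
      if c = '?' then (pvExpandB cs).flatMap (fun e => [e ++ ['.'], e ++ ['-']])
      else (pvExpandB cs).map (· ++ [c]) := by
  induction cs with
  | nil => by_cases h : c = '?' <;> simp [pvExpandB, h]
  | cons d rest ih =>
      rw [List.cons_append, pvExpandB_cons, pvExpandB_cons, ih]
      by_cases h : c = '?' <;> by_cases hd : d = '?' <;>
        simp [h, hd, List.flatMap_append, List.map_flatMap, List.flatMap_map,
          List.map_map, Function.comp_def]

-- no '?' means B returns the single original string
theorem pvExpandB_no_q {cs : List Char} (h : '?' ∉ cs) : pvExpandB cs = [cs] := by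
  induction cs with
  | nil => rfl
  | cons c rest ih =>
      simp only [List.mem_cons, not_or] at h
      have hc : c ≠ '?' := fun hc => h.1 hc.symm
      simp [pvExpandB_cons, hc, ih h.2]

-- A's loop invariant: after scanning the first n positions, the state is the set of
-- expansions of the scanned prefix, each followed by the untouched suffix.
theorem pvExpandA_loop (cs : List Char) (n : Nat) (hn : n ≤ cs.length) :
    (PySem.List.pyRange 0 (n : Int) 1).foldl
      (fun combinations i =>
        if PySem.List.pyGetD cs i ' ' = '?' then
          combinations.foldl
            (fun new_combinations combo =>
              new_combinations
                ++ [PySem.List.slice combo none (some i) ++ ['.']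
                      ++ PySem.List.slice combo (some (i + 1)) none]
                ++ [PySem.List.slice combo none (some i) ++ ['-']
                      ++ PySem.List.slice combo (some (i + 1)) none]) []
        else combinations)
      [cs]
    = (pvExpandB (cs.take n)).map (· ++ cs.drop n) := by
  induction n with
  | zero => simp [PySem.List.pyRange, pvExpandB]
  | succ n ih =>
      have hn' : n ≤ cs.length := Nat.le_of_succ_le hn
      have hcast : ((n : Int) + 1) = ((n + 1 : Nat) : Int) := by push_cast; ring
      rw [show ((n + 1 : Nat) : Int) = (n : Int) + 1 by push_cast; ring,
        PySem.List.pyRange_one_succ_right (by positivity), List.foldl_append, ih hn']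
      have hlt : n < cs.length := hn
      have hget : PySem.List.pyGetD cs (n : Int) ' ' = cs[n] := by
        rw [PySem.List.pyGetD_natCast]; exact List.getD_eq_getElem cs ' ' hlt
      have htake : cs.take (n + 1) = cs.take n ++ [cs[n]] := List.take_succ_eq_append_getElem hlt
      have hdrop : cs.drop n = cs[n] :: cs.drop (n + 1) :=
        (List.getElem_cons_drop hlt).symm
      -- each combo in the state splits as e ++ drop n cs with e of length n
      have hslices : ∀ e ∈ pvExpandB (cs.take n),
          PySem.List.slice (e ++ cs.drop n) none (some (n : Int)) = e ∧
          PySem.List.slice (e ++ cs.drop n) (some ((n : Int) + 1)) none = cs.drop (n + 1) := by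
        intro e he
        have hlen : e.length = n := by
          simpa [Nat.min_eq_left hn'] using pvExpandB_length he
        constructor
        · rw [PySem.List.slice_to_natCast, ← hlen]
          exact List.take_left
        · rw [hcast, PySem.List.slice_from_natCast, hdrop,
            show e ++ cs[n] :: cs.drop (n + 1) = (e ++ [cs[n]]) ++ cs.drop (n + 1) by simp,
            show n + 1 = (e ++ [cs[n]]).length by simp [hlen]]
          exact List.drop_left
      simp only [List.foldl_cons, List.foldl_nil]
      by_cases hq : cs[n] = '?'
      · rw [if_pos (by rw [hget, hq])]
        simp only [List.append_assoc, List.singleton_append]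
        rw [PySem.List.foldl_append_eq_flatMap, List.nil_append, List.flatMap_map]
        rw [htake, hq, pvExpandB_snoc, if_pos rfl, List.map_flatMap]
        apply List.flatMap_congr
        intro e he
        obtain ⟨h1, h2⟩ := hslices e he
        simp [h1, h2]
      · rw [if_neg (by rw [hget]; exact hq)]
        rw [htake, pvExpandB_snoc, if_neg hq, List.map_map]
        apply List.map_congr_left
        intro e he
        show e ++ cs.drop n = (e ++ [cs[n]]) ++ cs.drop (n + 1)
        rw [hdrop]; simp

-- A and B compute the same list of character lists
theorem pvExpandA_eq (cs : List Char) : pvExpandA cs = pvExpandB cs := by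
  unfold pvExpandA
  by_cases h : PySem.Chars.isIn ['?'] cs = false
  · rw [if_pos h]
    have : '?' ∉ cs := fun hmem =>
      ((PySem.Chars.isIn_eq_false_iff ['?'] cs).mp h) ((List.singleton_infix_iff '?' cs).mpr hmem)
    rw [pvExpandB_no_q this]
  · rw [if_neg h]
    simpa using pvExpandA_loop cs cs.length le_rfl

-- ===== VERDICT (by name: the statement is the Claim_ definition above) =====
theorem expand_combinations_spec : Claim_equal_expand_combinations := by
  intro s _
  unfold Spec_expand_combinations expand_combinations expand_combinations_alt
  rw [pvExpandA_eq]
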